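-- pv_equiv track=rewrite | github.com/yang-su2000/CP-Practice | archived/2022-11/836c.py | foo
-- ===== SOURCE A (Python) =====
-- def foo(n, x):
--     if n % x:
--         return [-1]
--     ans = [i for i in range(1, n+1)]
--     ans[0] = x
--     ans[-1] = 1
--     i = 2 * x
--     while i <= n:
--         if n % i == 0:
--             ans[x-1] = i
--             x = i
--         i += x
--     return ans
-- ===== SOURCE B (Python) =====
-- def foo(n, x):
--     if n % x:
--         return [-1]
--     ans = [i for i in range(1, n+1)]
--     ans[0] = x
--     ans[-1] = 1
--     cur = x
--     m = n // x
--     p = 2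
--     while p * p <= m:
--         while m % p == 0:
--             nxt = cur * p
--             ans[cur - 1] = nxt
--             cur = nxt
--             m //= p
--         p += 1
--     if m > 1:
--         ans[cur - 1] = cur * m
--     return ans
-- ===== Notes on version B (the rewrite author's own statement) =====
-- stated objective: alternative
-- what changed: Replaced A's repeated scan over the multiples of the current chain element with a single trial-division factorization of n//x: each prime factor (ascending, with multiplicity) extends the divisor chain by one multiplication, since the smallest multiple of cur dividing n is cur times the smallest prime factor of n/cur.
import Mathlib
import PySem

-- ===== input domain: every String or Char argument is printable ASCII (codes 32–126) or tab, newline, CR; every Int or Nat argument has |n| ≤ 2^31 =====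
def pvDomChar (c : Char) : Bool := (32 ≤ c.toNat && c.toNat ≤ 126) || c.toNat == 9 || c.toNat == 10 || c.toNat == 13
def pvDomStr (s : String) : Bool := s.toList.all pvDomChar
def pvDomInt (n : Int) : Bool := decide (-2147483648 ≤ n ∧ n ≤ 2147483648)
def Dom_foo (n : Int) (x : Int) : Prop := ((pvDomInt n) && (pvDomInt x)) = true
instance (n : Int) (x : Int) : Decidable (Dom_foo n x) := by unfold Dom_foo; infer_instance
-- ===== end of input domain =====

-- B replaces A's scan over the multiples of the current chain element by a trial-division
-- factorization of n//x, each prime factor extending the divisor chain by one multiplication.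

-- ===== PORT A =====
-- the while loop of A; state (x, i, ans), fuel decreases once per iteration
def fooLoop : Nat → Int → Int → Int → List Int → List Int
  | 0, _, _, _, ans => ans
  | fuel+1, n, x, i, ans =>
    if i ≤ n then
      if PySem.Int.mod n i = 0 then
        fooLoop fuel n i (i + i) (PySem.List.pySetD ans (x - 1) i)
      else
        fooLoop fuel n x (i + x) ans
    else ans

def foo (n : Int) (x : Int) : List Int :=
  if PySem.Int.mod n x ≠ 0 then [-1]
  else
    let ans := PySem.List.pyRange 1 (n + 1) 1
    let ans := PySem.List.pySetD ans 0 x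
    let ans := PySem.List.pySetD ans (-1) 1
    fooLoop (n.toNat + 1) n x (2 * x) ans

-- ===== PORT B =====
-- inner while of B: divide all factors p out of m, extending the chain; state (m, cur, ans)
def fooAltInner : Nat → Int → Int → Int → List Int → Int × Int × List Int
  | 0, m, _, cur, ans => (m, cur, ans)
  | fuel+1, m, p, cur, ans =>
    if PySem.Int.mod m p = 0 then
      fooAltInner fuel (PySem.Int.floordiv m p) p (cur * p)
        (PySem.List.pySetD ans (cur - 1) (cur * p))
    else (m, cur, ans)

-- outer while of B: trial division, p = 2, 3, … while p*p ≤ m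
def fooAltOuter : Nat → Int → Int → Int → List Int → Int × Int × List Int
  | 0, m, _, cur, ans => (m, cur, ans)
  | fuel+1, m, p, cur, ans =>
    if p * p ≤ m then
      match fooAltInner (m.toNat + 1) m p cur ans with
      | (m', cur', ans') => fooAltOuter fuel m' (p + 1) cur' ans'
    else (m, cur, ans)

def foo_alt (n : Int) (x : Int) : List Int :=
  if PySem.Int.mod n x ≠ 0 then [-1]
  else
    let ans := PySem.List.pyRange 1 (n + 1) 1
    let ans := PySem.List.pySetD ans 0 x
    let ans := PySem.List.pySetD ans (-1) 1
    let m := PySem.Int.floordiv n x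
    match fooAltOuter (m.toNat + 1) m 2 x ans with
    | (m', cur', ans') =>
      if 1 < m' then PySem.List.pySetD ans' (cur' - 1) (cur' * m') else ans'

-- ===== PRECONDITION & SPEC =====
-- Pre_ excludes exactly the inputs where A does not return: x = 0 (ZeroDivisionError), and
-- inputs with x ∣ n but not (1 ≤ x ∧ 1 ≤ n), where A raises IndexError on the empty range
-- list (n ≤ 0) or loops forever (x < 0).
def Pre_foo (n : Int) (x : Int) : Prop :=
  (x ≠ 0 ∧ PySem.Int.mod n x ≠ 0) ∨ (1 ≤ x ∧ 1 ≤ n)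
instance (n : Int) (x : Int) : Decidable (Pre_foo n x) := by unfold Pre_foo; infer_instance
def pvWitness_foo : Int × Int := (6, 2)

def Spec_foo (n : Int) (x : Int) (out : List Int) : Prop := out = foo_alt n x
instance (n : Int) (x : Int) (out : List Int) : Decidable (Spec_foo n x out) := by unfold Spec_foo; infer_instance

-- ===== CLAIM (what is proved, stated in full; the proofs are below) =====
def Claim_equal_foo : Prop := ∀ (n : Int) (x : Int), Dom_foo n x → Pre_foo n x → Spec_foo n x (foo n x)

-- ===== LEMMAS AND PROOFS =====

-- the common abstraction: walk the ascending prime-factor list, writing the chain into ans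
def chainWrite : Int → List Nat → List Int → List Int
  | _, [], ans => ans
  | x, p :: ps, ans => chainWrite (x * (p : Int)) ps (PySem.List.pySetD ans (x - 1) (x * (p : Int)))

-- the defining cons equation of primeFactorsList for mN ≥ 2
lemma factors_cons (mN : Nat) (h : 2 ≤ mN) :
    mN.primeFactorsList = mN.minFac :: (mN / mN.minFac).primeFactorsList := by
  obtain ⟨k, rfl⟩ : ∃ k, mN = k + 2 := ⟨mN - 2, by omega⟩
  exact Nat.primeFactorsList_add_two k

-- no Int j with 2 ≤ j < minFac divides mN
lemma no_small_dvd (mN : Nat) (j : Int) (h2 : 2 ≤ j) (hlt : j < (mN.minFac : Int)) :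
    ¬ j ∣ (mN : Int) := by
  intro hdvd
  have hj0 : 0 ≤ j := by omega
  have hjn : (j.toNat : Int) = j := Int.toNat_of_nonneg hj0
  have hdvdN : j.toNat ∣ mN := by
    have : (j.toNat : Int) ∣ (mN : Int) := by rw [hjn]; exact hdvd
    exact_mod_cast this
  have h2N : 2 ≤ j.toNat := by omega
  have := Nat.minFac_le_of_dvd h2N hdvdN
  omega

-- A's scan from i = k*x to the first dividing multiple i = minFac(m)*x
lemma scanA (n x : Int) (mN : Nat) (hx : 1 ≤ x) (hn : n = x * mN) :
    ∀ (c : Nat) (k : Int) (fuel : Nat) (ans : List Int),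
      2 ≤ k → k + c = (mN.minFac : Int) →
      n + 1 ≤ k * x + fuel →
      ∃ fuel', fooLoop fuel n x (k * x) ans = fooLoop fuel' n x ((mN.minFac : Int) * x) ans ∧
        n + 1 ≤ (mN.minFac : Int) * x + fuel' := by
  intro c
  induction c with
  | zero =>
    intro k fuel ans hk2 hkc hfuel
    have : k = (mN.minFac : Int) := by omega
    subst this
    exact ⟨fuel, rfl, hfuel⟩
  | succ c ih =>
    intro k fuel ans hk2 hkc hfuel
    have hklt : k < (mN.minFac : Int) := by omega
    have hkx_le_px : k * x ≤ (mN.minFac : Int) * x :=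
      mul_le_mul_of_nonneg_right (le_of_lt hklt) (by omega)
    match fuel with
    | 0 =>
      refine ⟨0, rfl, by omega⟩
    | fuel + 1 =>
      by_cases hle : k * x ≤ n
      · have hmodne : PySem.Int.mod n (k * x) ≠ 0 := by
          rw [Ne, PySem.Int.mod_eq_zero_iff_dvd]
          intro hdvd
          have hx0 : x ≠ 0 := by omega
          have : k ∣ (mN : Int) := by
            rcases hdvd with ⟨t, ht⟩
            refine ⟨t, ?_⟩
            have : x * (mN : Int) = x * (k * t) := by rw [← hn, ht]; ring
            exact mul_left_cancel₀ hx0 this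
          exact no_small_dvd mN k hk2 hklt this
        have hstep : fooLoop (fuel + 1) n x (k * x) ans = fooLoop fuel n x ((k + 1) * x) ans := by
          simp only [fooLoop, if_pos hle, if_neg hmodne]
          ring_nf
        rw [hstep]
        refine ih (k + 1) fuel ans (by omega) (by omega) ?_
        have hkx1 : (k + 1) * x = k * x + x := by ring
        omega
      · refine ⟨0, ?_, by omega⟩
        simp only [fooLoop, if_neg hle]

-- A's loop computes chainWrite over the prime factor list of m
lemma loopA_chain (n : Int) : ∀ (mN : Nat) (x : Int) (fuel : Nat) (ans : List Int),
    1 ≤ x → 1 ≤ mN → n = x * mN → n + 1 ≤ 2 * x + fuel →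
    fooLoop fuel n x (2 * x) ans = chainWrite x mN.primeFactorsList ans := by
  intro mN
  induction mN using Nat.strong_induction_on with
  | _ mN ih =>
    intro x fuel ans hx hm hn hfuel
    by_cases hm1 : mN = 1
    · subst hm1
      simp only [Nat.primeFactorsList_one, chainWrite]
      have hxn : n = x := by omega
      match fuel with
      | 0 => rfl
      | fuel + 1 =>
        have : ¬ (2 * x ≤ n) := by omega
        simp only [fooLoop, if_neg this]
    · -- mN ≥ 2
      have hm2 : 2 ≤ mN := by omega
      have hpp : mN.minFac.Prime := Nat.minFac_prime hm1
      have hp2 : 2 ≤ mN.minFac := hpp.two_le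
      have hpdvd : mN.minFac ∣ mN := Nat.minFac_dvd mN
      have hple : mN.minFac ≤ mN := Nat.le_of_dvd (by omega) hpdvd
      obtain ⟨fuel', heq, hfuel'⟩ :=
        scanA n x mN hx hn (mN.minFac - 2) 2 fuel ans (le_refl 2) (by omega) (by omega)
      have hpxle : (mN.minFac : Int) * x ≤ n := by
        rw [hn]
        calc (mN.minFac : Int) * x ≤ (mN : Int) * x :=
              mul_le_mul_of_nonneg_right (by exact_mod_cast hple) (by omega)
          _ = x * mN := by ring
      have hpx1 : 1 ≤ (mN.minFac : Int) * x := by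
        have h2' : (2 : Int) ≤ (mN.minFac : Int) := by exact_mod_cast hp2
        nlinarith
      obtain ⟨fuel'', rfl⟩ : ∃ k, fuel' = k + 1 := ⟨fuel' - 1, by omega⟩
      have hmod0 : PySem.Int.mod n ((mN.minFac : Int) * x) = 0 := by
        rw [PySem.Int.mod_eq_zero_iff_dvd, hn]
        obtain ⟨t, ht⟩ := hpdvd
        have hcast : (mN : Int) = (mN.minFac : Int) * (t : Int) := by exact_mod_cast ht
        exact ⟨(t : Int), by rw [hcast]; ring⟩
      rw [heq]
      simp only [fooLoop, if_pos hpxle, if_pos hmod0]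
      -- recurse with x' = minFac*x, m' = mN / minFac
      have hq1 : 1 ≤ mN / mN.minFac := (Nat.one_le_div_iff (by omega)).mpr hple
      have hqlt : mN / mN.minFac < mN := Nat.div_lt_self (by omega) (by omega)
      have hmNfact : (mN : Int) = (mN.minFac : Int) * ((mN / mN.minFac : Nat) : Int) := by
        exact_mod_cast (Nat.mul_div_cancel' hpdvd).symm
      have hrec := ih (mN / mN.minFac) hqlt ((mN.minFac : Int) * x) fuel''
        (PySem.List.pySetD ans (x - 1) ((mN.minFac : Int) * x))
        (by omega) hq1 (by rw [hn, hmNfact]; ring)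
        (by have h2x : 2 * ((mN.minFac : Int) * x) = (mN.minFac : Int) * x + (mN.minFac : Int) * x := by ring
            omega)
      have h2px : (mN.minFac : Int) * x + (mN.minFac : Int) * x = 2 * ((mN.minFac : Int) * x) := by ring
      rw [h2px, hrec]
      rw [factors_cons mN hm2]
      simp only [chainWrite]
      rw [mul_comm x (mN.minFac : Int)]

-- B's inner loop: divides all p's out of m, result relates by chainWrite
lemma innerB (p : Int) (hp : 2 ≤ p) :
    ∀ (fuel : Nat) (m cur : Int) (ans : List Int),
      1 ≤ m → m.toNat ≤ fuel →
      (∀ j : Int, 2 ≤ j → j < p → ¬ j ∣ m) →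
      (fooAltInner fuel m p cur ans).1 ∣ m ∧ 1 ≤ (fooAltInner fuel m p cur ans).1 ∧
      ¬ p ∣ (fooAltInner fuel m p cur ans).1 ∧
      chainWrite cur m.toNat.primeFactorsList ans =
        chainWrite (fooAltInner fuel m p cur ans).2.1
          ((fooAltInner fuel m p cur ans).1).toNat.primeFactorsList
          (fooAltInner fuel m p cur ans).2.2 := by
  intro fuel
  induction fuel with
  | zero => intro m cur ans hm hfuel H; omega
  | succ fuel ih =>
    intro m cur ans hm hfuel H
    by_cases hdvd : p ∣ m
    · have hmod : PySem.Int.mod m p = 0 := (PySem.Int.mod_eq_zero_iff_dvd m p).mpr hdvd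
      have hm2 : 2 ≤ m := le_trans hp (Int.le_of_dvd (by omega) hdvd)
      have hfd : PySem.Int.floordiv m p = m / p := PySem.Int.floordiv_eq_ediv_of_pos (by omega)
      have hmp1 : 1 ≤ m / p := by
        rcases hdvd with ⟨t, ht⟩
        have : m / p = t := by rw [ht]; exact Int.mul_ediv_cancel_left t (by omega)
        rw [this]; nlinarith
      have hmplt : m / p < m := by
        rw [Int.ediv_lt_iff_lt_mul (by omega : (0:Int) < p)]
        nlinarith
      have hmpdvd : m / p ∣ m := by
        rcases hdvd with ⟨t, ht⟩
        refine ⟨p, ?_⟩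
        rw [ht]
        rw [Int.mul_ediv_cancel_left t (by omega : p ≠ 0)]
        ring
      have H' : ∀ j : Int, 2 ≤ j → j < p → ¬ j ∣ (m / p) := fun j h2 hlt hj =>
        H j h2 hlt (hj.trans hmpdvd)
      have hfuel' : (m / p).toNat ≤ fuel := by omega
      have hrest := ih (m / p) (cur * p) (PySem.List.pySetD ans (cur - 1) (cur * p)) hmp1 hfuel' H'
      simp only [fooAltInner, if_pos hmod, hfd]
      refine ⟨(hrest.1).trans hmpdvd, hrest.2.1, hrest.2.2.1, ?_⟩
      -- minFac m.toNat = p.toNat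
      have hpN : 2 ≤ p.toNat := by omega
      have hdvdN : p.toNat ∣ m.toNat := by
        have : ((p.toNat : Int)) ∣ ((m.toNat : Int)) := by
          rw [Int.toNat_of_nonneg (by omega : (0:Int) ≤ p), Int.toNat_of_nonneg (by omega : (0:Int) ≤ m)]
          exact hdvd
        exact_mod_cast this
      have hminle : m.toNat.minFac ≤ p.toNat := Nat.minFac_le_of_dvd hpN hdvdN
      have hmin2 : 2 ≤ m.toNat.minFac := (Nat.minFac_prime (by omega : m.toNat ≠ 1)).two_le
      have hminfac : m.toNat.minFac = p.toNat := by
        by_contra hne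
        have hlt : (m.toNat.minFac : Int) < p := by omega
        exact H (m.toNat.minFac : Int) (by exact_mod_cast hmin2) hlt
          (by
            have hd := Nat.minFac_dvd m.toNat
            have : ((m.toNat.minFac : Int)) ∣ ((m.toNat : Int)) := by exact_mod_cast hd
            rwa [Int.toNat_of_nonneg (by omega : (0:Int) ≤ m)] at this)
      have hfl : m.toNat.primeFactorsList =
          p.toNat :: (m.toNat / p.toNat).primeFactorsList := by
        have := factors_cons m.toNat (by omega)
        rwa [hminfac] at this
      have hdivN : ((m.toNat / p.toNat : Nat) : Int) = m / p := by
        rw [Int.natCast_div, Int.toNat_of_nonneg (by omega : (0:Int) ≤ m),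
          Int.toNat_of_nonneg (by omega : (0:Int) ≤ p)]
      rw [hfl]
      simp only [chainWrite]
      rw [Int.toNat_of_nonneg (by omega : (0:Int) ≤ p)]
      rw [show ((m.toNat / p.toNat : Nat)) = (m / p).toNat by omega]
      exact hrest.2.2.2
    · have hmod : PySem.Int.mod m p ≠ 0 := fun h =>
        hdvd ((PySem.Int.mod_eq_zero_iff_dvd m p).mp h)
      simp only [fooAltInner, if_neg hmod]
      exact ⟨dvd_refl m, hm, hdvd, by trivial⟩

-- exit situation of B's outer loop: m < p*p with no factor below p means m = 1 or m prime
lemma exitB (m p cur : Int) (ans : List Int) (hp : 2 ≤ p) (hm : 1 ≤ m) (hlt : m < p * p)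
    (H : ∀ j : Int, 2 ≤ j → j < p → ¬ j ∣ m) :
    (if 1 < m then PySem.List.pySetD ans (cur - 1) (cur * m) else ans) =
      chainWrite cur m.toNat.primeFactorsList ans := by
  by_cases hm1 : 1 < m
  · rw [if_pos hm1]
    have hmN2 : 2 ≤ m.toNat := by omega
    have hprime : m.toNat.Prime := by
      by_contra hnp
      have hsq := Nat.minFac_sq_le_self (by omega : 0 < m.toNat) hnp
      have hmin2 : 2 ≤ m.toNat.minFac := (Nat.minFac_prime (by omega : m.toNat ≠ 1)).two_le
      have hminlt : (m.toNat.minFac : Int) < p := by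
        nlinarith [sq_nonneg ((m.toNat.minFac : Int) - p),
          (by exact_mod_cast hsq : ((m.toNat.minFac : Int)) ^ 2 ≤ (m.toNat : Int)),
          (by omega : ((m.toNat : Int)) = m)]
      refine H (m.toNat.minFac : Int) (by exact_mod_cast hmin2) hminlt ?_
      have hd := Nat.minFac_dvd m.toNat
      have : ((m.toNat.minFac : Int)) ∣ ((m.toNat : Int)) := by exact_mod_cast hd
      rwa [Int.toNat_of_nonneg (by omega : (0:Int) ≤ m)] at this
    rw [Nat.primeFactorsList_prime hprime]
    simp only [chainWrite]
    rw [Int.toNat_of_nonneg (by omega : (0:Int) ≤ m)]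
  · rw [if_neg hm1]
    have : m = 1 := by omega
    subst this
    simp [chainWrite, Nat.primeFactorsList_one]

-- B's outer loop plus the final write computes chainWrite
lemma outerB : ∀ (fuel : Nat) (m p cur : Int) (ans : List Int),
    2 ≤ p → 1 ≤ m → m.toNat + 2 ≤ fuel + p.toNat →
    (∀ j : Int, 2 ≤ j → j < p → ¬ j ∣ m) →
    (match fooAltOuter fuel m p cur ans with
     | (m', cur', ans') =>
       if 1 < m' then PySem.List.pySetD ans' (cur' - 1) (cur' * m') else ans') =
      chainWrite cur m.toNat.primeFactorsList ans := by
  intro fuel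
  induction fuel with
  | zero =>
    intro m p cur ans hp hm hfuel H
    simp only [fooAltOuter]
    exact exitB m p cur ans hp hm (by nlinarith [(by omega : m + 2 ≤ p)]) H
  | succ fuel ih =>
    intro m p cur ans hp hm hfuel H
    by_cases hcond : p * p ≤ m
    · obtain ⟨hdvd', hm1', hnp', hchain⟩ := innerB p hp (m.toNat + 1) m cur ans hm (by omega) H
      set r := fooAltInner (m.toNat + 1) m p cur ans with hr
      have hle' : r.1 ≤ m := Int.le_of_dvd (by omega) hdvd'
      have H' : ∀ j : Int, 2 ≤ j → j < p + 1 → ¬ j ∣ r.1 := by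
        intro j h2 hlt hj
        by_cases hjp : j < p
        · exact H j h2 hjp (hj.trans hdvd')
        · have : j = p := by omega
          subst this
          exact hnp' hj
      have := ih r.1 (p + 1) r.2.1 r.2.2 (by omega) hm1' (by omega) H'
      simp only [fooAltOuter, if_pos hcond]
      rw [hchain]
      rw [← this]
    · simp only [fooAltOuter, if_neg hcond]
      exact exitB m p cur ans hp hm (by omega) H

-- ===== VERDICT (by name: the statement is the Claim_ definition above) =====
theorem foo_spec : Claim_equal_foo := by
  intro n x _hdom hpre
  unfold Spec_foo foo foo_alt
  by_cases hmod : PySem.Int.mod n x ≠ 0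
  · rw [if_pos hmod, if_pos hmod]
  · rw [if_neg hmod, if_neg hmod]
    rw [not_not] at hmod
    have hdvd : x ∣ n := (PySem.Int.mod_eq_zero_iff_dvd n x).mp hmod
    have hx1 : 1 ≤ x := by
      rcases hpre with ⟨_, h⟩ | ⟨h, _⟩
      · exact absurd hmod h
      · exact h
    have hn1 : 1 ≤ n := by
      rcases hpre with ⟨_, h⟩ | ⟨_, h⟩
      · exact absurd hmod h
      · exact h
    have hfd : PySem.Int.floordiv n x = n / x := PySem.Int.floordiv_eq_ediv_of_pos (by omega)
    set m := n / x with hmdef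
    have hnm : n = x * m := (Int.mul_ediv_cancel' hdvd).symm
    have hm1 : 1 ≤ m := by
      by_contra hc
      have hc' : m ≤ 0 := by omega
      have : x * m ≤ 0 := mul_nonpos_of_nonneg_of_nonpos (by omega) hc'
      omega
    have hmN : m = ((m.toNat : Nat) : Int) := by omega
    set ans0 := PySem.List.pySetD (PySem.List.pySetD (PySem.List.pyRange 1 (n + 1) 1) 0 x) (-1) 1
    have hA : fooLoop (n.toNat + 1) n x (2 * x) ans0 =
        chainWrite x m.toNat.primeFactorsList ans0 :=
      loopA_chain n m.toNat x (n.toNat + 1) ans0 hx1 (by omega)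
        (by rw [hnm]; exact congrArg (fun z => x * z) hmN) (by omega)
    have hB := outerB (m.toNat + 1) m 2 x ans0 (by omega) hm1 (by omega)
      (by intro j h2 hlt; omega)
    simp only [hfd]
    rw [hA, ← hB]
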